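-- pv_equiv track=rewrite | github.com/certifiedprogamer/python | challenges/wave_sorting.py | WaveSorting
-- ===== SOURCE A (Python) =====
-- def WaveSorting(arr: list):
--     alternator = False
--     for i in range(len(arr) - 1):
--         if alternator == False:
--             if arr[i] > arr[i+1]:
--                 alternator = True
--                 pass
--             else:
--                 return False
--         elif alternator == True:
--             if arr[i] < arr[i+1]:
--                 alternator = False
--                 pass
--             else:
--                 return False
--     return True
-- ===== SOURCE B (Python) =====
-- def WaveSorting(arr: list):
--     n = len(arr)
--     s = [(1 if arr[i] > arr[i+1] else (-1 if arr[i] < arr[i+1] else 0)) for i in range(n - 1)]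
--     if not s:
--         return True
--     return s[0] == 1 and all(s[j] * s[j+1] == -1 for j in range(len(s) - 1))
-- ===== Notes on version B (the rewrite author's own statement) =====
-- stated objective: alternative
-- what changed: Replaces A's toggling-flag single pass with early returns by a derive-then-check decomposition: build the comparison sign array once, then check its head is 1 and every adjacent product is -1.
import Mathlib
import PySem

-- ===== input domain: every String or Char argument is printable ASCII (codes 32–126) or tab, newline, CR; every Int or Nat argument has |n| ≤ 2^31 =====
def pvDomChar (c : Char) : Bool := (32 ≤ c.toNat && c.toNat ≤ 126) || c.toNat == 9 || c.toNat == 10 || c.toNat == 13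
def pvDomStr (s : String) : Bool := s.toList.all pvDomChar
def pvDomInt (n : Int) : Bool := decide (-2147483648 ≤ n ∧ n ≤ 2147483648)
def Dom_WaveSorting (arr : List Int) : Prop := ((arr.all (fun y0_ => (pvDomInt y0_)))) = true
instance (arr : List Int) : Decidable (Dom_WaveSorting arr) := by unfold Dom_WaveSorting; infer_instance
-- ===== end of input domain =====

-- B re-implements A's toggling-flag wave check as a derive-then-check decomposition
-- (sign array, then head/adjacent-product invariant); alternative, same cost.

-- ===== PORT A =====
-- Fold over range(len(arr)-1) with the SAME state: `some alt` = loop running with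
-- alternator=alt, `none` = an early `return False` happened.  Every index i produced
-- by the range satisfies 0 ≤ i and i+1 < arr.length, so plain getD is exact for arr[i].
def WaveSorting (arr : List Int) : Bool :=
  ((List.range (arr.length - 1)).foldl
    (fun st i =>
      match st with
      | none => none
      | some alt =>
        if alt = false then
          if arr.getD i 0 > arr.getD (i+1) 0 then some true else none
        else
          if arr.getD i 0 < arr.getD (i+1) 0 then some false else none)
    (some false)).isSome

-- ===== PORT B =====
-- the 1 / -1 / 0 comparison sign of Source B's list comprehension
def pySign (a b : Int) : Int := if a > b then 1 else if a < b then -1 else 0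

def WaveSorting_alt (arr : List Int) : Bool :=
  let s := (List.range (arr.length - 1)).map (fun i => pySign (arr.getD i 0) (arr.getD (i+1) 0))
  if s = [] then true
  else (s.getD 0 0 == 1) &&
       (List.range (s.length - 1)).all (fun j => s.getD j 0 * s.getD (j+1) 0 == -1)

-- ===== PRECONDITION & SPEC =====
def Spec_WaveSorting (arr : List Int) (out : Bool) : Prop := out = WaveSorting_alt arr
instance (arr : List Int) (out : Bool) : Decidable (Spec_WaveSorting arr out) := by unfold Spec_WaveSorting; infer_instance

-- ===== CLAIM (what is proved, stated in full; the proofs are below) =====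
def Claim_equal_WaveSorting : Prop := ∀ (arr : List Int), Dom_WaveSorting arr → Spec_WaveSorting arr (WaveSorting arr)

-- ===== LEMMAS AND PROOFS =====

-- Transport an adjacent-index fold over `range (l.length-1)` to a fold over `l.zip l.tail`.
theorem foldl_range_adj {σ β : Type} (l : List β) (d : β) (step : σ → β → β → σ) (init : σ) :
    (List.range (l.length - 1)).foldl (fun st i => step st (l.getD i d) (l.getD (i+1) d)) init
      = (l.zip l.tail).foldl (fun st p => step st p.1 p.2) init := by
  induction l generalizing init with
  | nil => simp
  | cons x xs ih =>
    cases xs with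
    | nil => simp
    | cons y ys =>
      have h : (x :: y :: ys).length - 1 = (y :: ys).length := by simp
      rw [h, List.length_cons, List.range_succ_eq_map, List.foldl_cons, List.foldl_map]
      simpa using ih (init := step init x y)

theorem map_range_adj {β γ : Type} (l : List β) (d : β) (f : β → β → γ) :
    (List.range (l.length - 1)).map (fun i => f (l.getD i d) (l.getD (i+1) d))
      = (l.zip l.tail).map (fun p => f p.1 p.2) := by
  induction l with
  | nil => simp
  | cons x xs ih =>
    cases xs with
    | nil => simp
    | cons y ys =>
      have h : (x :: y :: ys).length - 1 = (y :: ys).length := by simp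
      rw [h, List.length_cons, List.range_succ_eq_map, List.map_cons, List.map_map]
      simpa using ih

theorem all_range_adj {β : Type} (l : List β) (d : β) (f : β → β → Bool) :
    (List.range (l.length - 1)).all (fun i => f (l.getD i d) (l.getD (i+1) d))
      = (l.zip l.tail).all (fun p => f p.1 p.2) := by
  induction l with
  | nil => simp
  | cons x xs ih =>
    cases xs with
    | nil => simp
    | cons y ys =>
      have h : (x :: y :: ys).length - 1 = (y :: ys).length := by simp
      rw [h, List.length_cons, List.range_succ_eq_map, List.all_cons, List.all_map]
      congr 1
      all_goals simpa [Function.comp_def] using ih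

-- An alternating-expectation checker on sign lists: the list must read e, -e, e, ….
def goodFrom : List Int → Int → Bool
  | [], _ => true
  | s0 :: r, e => (s0 == e) && goodFrom r (-e)

theorem foldA_none (pairs : List (Int × Int)) :
    pairs.foldl
      (fun st p =>
        match st with
        | none => none
        | some alt =>
          if alt = false then
            if p.1 > p.2 then some true else none
          else
            if p.1 < p.2 then some false else none)
      (none : Option Bool) = none := by
  induction pairs with
  | nil => rfl
  | cons p r ih => simpa using ih

-- A's fold computes exactly the alternating check on the sign list.
theorem foldA_goodFrom (pairs : List (Int × Int)) (alt : Bool) :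
    (pairs.foldl
      (fun st p =>
        match st with
        | none => none
        | some a =>
          if a = false then
            if p.1 > p.2 then some true else none
          else
            if p.1 < p.2 then some false else none)
      (some alt)).isSome
      = goodFrom (pairs.map (fun p => pySign p.1 p.2)) (if alt then -1 else 1) := by
  induction pairs generalizing alt with
  | nil => cases alt <;> rfl
  | cons p r ih =>
    cases alt with
    | false =>
      by_cases h : p.1 > p.2
      · simpa [goodFrom, pySign, h, show ¬ p.1 < p.2 by omega] using ih true
      · simp only [List.foldl_cons, List.map_cons, goodFrom]
        simp [pySign, h, foldA_none]
        split_ifs <;> simp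
    | true =>
      by_cases h : p.1 < p.2
      · simpa [goodFrom, pySign, h, show ¬ p.1 > p.2 by omega] using ih false
      · simp only [List.foldl_cons, List.map_cons, goodFrom]
        simp [pySign, h, foldA_none]
        split_ifs <;> simp

-- The alternating check equals "head is e and adjacent products are -1", for e = ±1.
theorem goodFrom_eq_check (r : List Int) (s0 e : Int) (he : e = 1 ∨ e = -1) :
    goodFrom (s0 :: r) e
      = ((s0 == e) && ((s0 :: r).zip r).all (fun p => p.1 * p.2 == -1)) := by
  induction r generalizing s0 e with
  | nil => simp [goodFrom]
  | cons s1 r' ih =>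
    have he' : -e = 1 ∨ -e = -1 := by omega
    have step : goodFrom (s0 :: s1 :: r') e = ((s0 == e) && goodFrom (s1 :: r') (-e)) := rfl
    rw [step, ih s1 (-e) he']
    by_cases h0 : s0 = e
    · subst h0
      have hprod : ((s1 == -s0) : Bool) = (s0 * s1 == -1) := by
        rcases he with h | h <;> subst h <;> simp
      simp [hprod]
    · rw [show (s0 == e) = false from by simp [h0]]
      simp

-- ===== VERDICT (by name: the statement is the Claim_ definition above) =====
theorem WaveSorting_spec : Claim_equal_WaveSorting := by
  intro arr _
  unfold Spec_WaveSorting WaveSorting WaveSorting_alt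
  rw [foldl_range_adj arr 0
        (fun (st : Option Bool) a b =>
          match st with
          | none => none
          | some alt =>
            if alt = false then
              if a > b then some true else none
            else
              if a < b then some false else none),
      map_range_adj arr 0 pySign]
  rw [foldA_goodFrom (arr.zip arr.tail) false]
  set pairs := arr.zip arr.tail with hp
  cases hpl : pairs.map (fun p => pySign p.1 p.2) with
  | nil => simp [goodFrom]
  | cons s0 r =>
    simp only [if_neg (by simp : ¬(s0 :: r = []))]
    rw [all_range_adj (s0 :: r) 0 (fun a b => a * b == -1)]
    have := goodFrom_eq_check r s0 1 (Or.inl rfl)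
    simp only [List.tail_cons] at *
    simpa using this
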